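-- pv_equiv track=rewrite | github.com/Kwounsu/Algorithms | 프로그래머스/호텔 방 배정.py | solution
-- ===== SOURCE A (Python) =====
-- def solution(k, room_number):
--     def find_vacancy(room_num):
--         if room_num not in rooms:
--             rooms[room_num] = room_num + 1
--             return room_num
--         else:
--             next_vacancy = find_vacancy(rooms[room_num])
--             rooms[room_num] = next_vacancy + 1
--             return next_vacancy
--
--     answer = []
--     rooms = {}
--
--     for room in room_number:
--         answer.append(find_vacancy(room))
--
--     return answer
-- ===== SOURCE B (Python) =====
-- def solution(k, room_number):
--     occupied = set()
--     answer = []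
--     for room in room_number:
--         cur = room
--         while cur in occupied:
--             cur += 1
--         answer.append(cur)
--         occupied.add(cur)
--     return answer
-- ===== Notes on version B (the rewrite author's own statement) =====
-- stated objective: simpler
-- what changed: Replaced the pointer-chasing dict with recursive path compression by a plain occupied-set and a linear upward scan from each queried room to the first free number; correctness rests on the invariant that A's chain from r always ends at the smallest unoccupied room >= r.
import Mathlib
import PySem

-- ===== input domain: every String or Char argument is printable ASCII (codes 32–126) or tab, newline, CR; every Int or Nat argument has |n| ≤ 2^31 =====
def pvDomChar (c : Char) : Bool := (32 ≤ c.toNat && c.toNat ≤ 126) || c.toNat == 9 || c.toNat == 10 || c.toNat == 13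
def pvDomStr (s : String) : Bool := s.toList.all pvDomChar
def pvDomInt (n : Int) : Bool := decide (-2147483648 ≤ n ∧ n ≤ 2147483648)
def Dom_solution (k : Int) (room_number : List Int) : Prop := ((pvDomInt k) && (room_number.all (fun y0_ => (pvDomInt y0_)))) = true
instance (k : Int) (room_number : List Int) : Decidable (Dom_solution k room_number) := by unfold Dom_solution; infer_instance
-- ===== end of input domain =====

-- B drops A's pointer-chasing dict (recursive find with path compression) entirely: it keeps a set
-- of occupied rooms and scans upward from each queried room to the first free number, which is
-- provably the room A's chain ends at; outputs are identical, only the return value is claimed.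

-- ===== PORT A =====
-- find_vacancy: recursion with fuel as a totality guard (none = fuel exhausted, unreachable in runs).
def findVacancyA : Nat → PySem.Dict Int Int → Int → Option (Int × PySem.Dict Int Int)
  | 0, _, _ => none
  | fuel+1, rooms, room_num =>
    match rooms.get? room_num with
    | none => some (room_num, rooms.insert room_num (room_num + 1))
    | some nxt =>
      match findVacancyA fuel rooms nxt with
      | none => none
      | some (v, rooms') => some (v, rooms'.insert room_num (v + 1))

def solution (k : Int) (room_number : List Int) : List Int :=
  (room_number.foldl
    (fun (st : List Int × PySem.Dict Int Int) room =>
      match findVacancyA (st.2.size + 1) st.2 room with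
      | none => st
      | some (v, rooms') => (st.1 ++ [v], rooms'))
    ([], PySem.Dict.empty)).1

-- ===== PORT B =====
-- the 'while cur in occupied: cur += 1' scan (fuel = totality guard, never exhausted in runs)
def scanUp : Nat → PySem.Set Int → Int → Int
  | 0, _, cur => cur
  | fuel+1, occ, cur => if PySem.Set.contains occ cur then scanUp fuel occ (cur + 1) else cur

def solution_alt (k : Int) (room_number : List Int) : List Int :=
  (room_number.foldl
    (fun (st : List Int × PySem.Set Int) room =>
      let v := scanUp (st.2.length + 1) st.2 room
      (st.1 ++ [v], PySem.Set.add st.2 v))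
    ([], PySem.Set.empty)).1

-- ===== PRECONDITION & SPEC =====
def Spec_solution (k : Int) (room_number : List Int) (out : List Int) : Prop := out = solution_alt k room_number
instance (k : Int) (room_number : List Int) (out : List Int) : Decidable (Spec_solution k room_number out) := by unfold Spec_solution; infer_instance

-- ===== CLAIM (what is proved, stated in full; the proofs are below) =====
def Claim_equal_solution : Prop := ∀ (k : Int) (room_number : List Int), Dom_solution k room_number → Spec_solution k room_number (solution k room_number)

-- ===== LEMMAS AND PROOFS =====

-- A's dict invariant: every stored pointer jumps over occupied rooms only
def InvD (d : PySem.Dict Int Int) : Prop :=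
  ∀ x y, d.get? x = some y → x < y ∧ ∀ z, x ≤ z → z < y → (d.get? z).isSome

theorem countP_lt_of {α : Type} (l : List α) (p q : α → Bool)
    (h : ∀ x ∈ l, p x = true → q x = true) (x0 : α) (hm : x0 ∈ l)
    (hq : q x0 = true) (hp : p x0 = false) : l.countP p < l.countP q := by
  induction l with
  | nil => cases hm
  | cons a t ih =>
    have hmono : t.countP p ≤ t.countP q :=
      List.countP_mono_left (fun x hx hpx => h x (List.mem_cons_of_mem a hx) hpx)
    rcases List.mem_cons.mp hm with rfl | hmt
    · simp only [List.countP_cons, hq, hp]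
      simp
      omega
    · have := ih (fun x hx => h x (List.mem_cons_of_mem a hx)) hmt
      have hpq : p a = true → q a = true := h a List.mem_cons_self
      simp only [List.countP_cons]
      cases hqa : q a <;> cases hpa : p a <;> simp_all <;> omega

-- the value A assigns and the dict it leaves behind, characterised without the recursion
theorem findA_spec (fuel : Nat) :
    ∀ (d : PySem.Dict Int Int) (r : Int), InvD d →
    d.keys.countP (fun x => decide (r ≤ x)) < fuel →
    ∃ v d', findVacancyA fuel d r = some (v, d') ∧
      r ≤ v ∧ d.get? v = none ∧
      (∀ z, r ≤ z → z < v → (d.get? z).isSome) ∧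
      (∀ x, (d'.get? x).isSome ↔ ((d.get? x).isSome ∨ x = v)) ∧
      (∀ x y, d'.get? x = some y →
        (d.get? x = some y) ∨ (y = v + 1 ∧ x ≤ v ∧ ∀ z, x ≤ z → z < v → (d.get? z).isSome)) := by
  induction fuel with
  | zero => intro d r _ hf; omega
  | succ fuel ih =>
    intro d r hinv hf
    cases hg : d.get? r with
    | none =>
      refine ⟨r, d.insert r (r + 1), by simp [findVacancyA, hg], le_refl r, hg, ?_, ?_, ?_⟩
      · intro z h1 h2; omega
      · intro x
        by_cases hx : x = r
        · simp [PySem.Dict.get?_insert, hx]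
        · simp [PySem.Dict.get?_insert, hx]
      · intro x y hxy
        rw [PySem.Dict.get?_insert] at hxy
        by_cases hx : x = r
        · rw [if_pos hx] at hxy
          right
          refine ⟨by injection hxy with h; omega, by omega, fun z h1 h2 => by omega⟩
        · rw [if_neg hx] at hxy
          exact Or.inl hxy
    | some nxt =>
      obtain ⟨hlt, hcov⟩ := hinv r nxt hg
      have hrk : r ∈ d.keys := by
        rw [← PySem.Dict.contains_iff_mem_keys, PySem.Dict.contains_eq_isSome_get?, hg]; rfl
      have hf' : d.keys.countP (fun x => decide (nxt ≤ x)) < fuel := by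
        have := countP_lt_of d.keys (fun x => decide (nxt ≤ x)) (fun x => decide (r ≤ x))
          (fun x _ hx => by simp at *; omega) r hrk (by simp) (by simp; omega)
        omega
      obtain ⟨v, d'', heq, hle, hnone, hcov', hkeys, hvals⟩ := ih d nxt hinv hf'
      refine ⟨v, d''.insert r (v + 1), by simp [findVacancyA, hg, heq], by omega, hnone, ?_, ?_, ?_⟩
      · intro z h1 h2
        by_cases hzn : z < nxt
        · exact hcov z h1 hzn
        · exact hcov' z (by omega) h2
      · intro x
        by_cases hx : x = r
        · simp [PySem.Dict.get?_insert, hx, hg]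
        · rw [PySem.Dict.get?_insert, if_neg hx, hkeys x]
      · intro x y hxy
        rw [PySem.Dict.get?_insert] at hxy
        by_cases hx : x = r
        · rw [if_pos hx] at hxy
          subst hx
          right
          refine ⟨by injection hxy with h; omega, by omega, ?_⟩
          intro z h1 h2
          by_cases hzn : z < nxt
          · exact hcov z h1 hzn
          · exact hcov' z (by omega) h2
        · rw [if_neg hx] at hxy
          rcases hvals x y hxy with h | ⟨h1, h2, h3⟩
          · exact Or.inl h
          · right
            refine ⟨h1, h2, fun z hz1 hz2 => ?_⟩
            by_cases hzn : z < nxt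
            · by_cases hzr : r ≤ z
              · exact hcov z hzr hzn
              · exact h3 z hz1 hz2
            · exact h3 z hz1 hz2

-- B's scan finds the first number ≥ r outside the occupied set
theorem scanUp_spec (fuel : Nat) :
    ∀ (s : PySem.Set Int) (r : Int),
    s.countP (fun x => decide (r ≤ x)) < fuel →
    r ≤ scanUp fuel s r ∧ scanUp fuel s r ∉ s ∧
      ∀ z, r ≤ z → z < scanUp fuel s r → z ∈ s := by
  induction fuel with
  | zero => intro s r hf; omega
  | succ fuel ih =>
    intro s r hf
    by_cases hm : r ∈ s
    · have hstep : scanUp (fuel + 1) s r = scanUp fuel s (r + 1) := by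
        simp [scanUp, hm]
      have hf' : s.countP (fun x => decide (r + 1 ≤ x)) < fuel := by
        have := countP_lt_of s (fun x => decide (r + 1 ≤ x)) (fun x => decide (r ≤ x))
          (fun x _ hx => by simp at *; omega) r hm (by simp) (by simp)
        omega
      obtain ⟨h1, h2, h3⟩ := ih s (r + 1) hf'
      rw [hstep]
      refine ⟨by omega, h2, ?_⟩
      intro z hz1 hz2
      by_cases hzr : z = r
      · subst hzr; exact hm
      · exact h3 z (by omega) hz2
    · have hstep : scanUp (fuel + 1) s r = r := by
        simp [scanUp, hm]
      rw [hstep]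
      exact ⟨le_refl r, hm, fun z h1 h2 => absurd h2 (by omega)⟩

theorem first_free_unique (mem : Int → Prop) (r v w : Int)
    (hv1 : r ≤ v) (hv2 : ¬ mem v) (hv3 : ∀ z, r ≤ z → z < v → mem z)
    (hw1 : r ≤ w) (hw2 : ¬ mem w) (hw3 : ∀ z, r ≤ z → z < w → mem z) : v = w := by
  by_contra hne
  rcases lt_or_gt_of_ne hne with h | h
  · exact hv2 (hw3 v hv1 h)
  · exact hw2 (hv3 w hw1 h)

theorem keys_countP_lt_size_succ (d : PySem.Dict Int Int) (r : Int) :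
    d.keys.countP (fun x => decide (r ≤ x)) < d.size + 1 := by
  have h1 : d.keys.countP (fun x => decide (r ≤ x)) ≤ d.keys.length := List.countP_le_length
  have h2 : d.keys.length = d.size := by
    simp [PySem.Dict.keys, PySem.Dict.size]
  omega

-- the joint loop invariant: same answers so far, the set holds exactly the dict's keys, dict invariant
theorem main_loop (rooms : List Int) :
    ∀ (acc : List Int) (d : PySem.Dict Int Int) (s : PySem.Set Int),
    InvD d → (∀ x, (d.get? x).isSome ↔ x ∈ s) →
    (rooms.foldl
      (fun (st : List Int × PySem.Dict Int Int) room =>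
        match findVacancyA (st.2.size + 1) st.2 room with
        | none => st
        | some (v, rooms') => (st.1 ++ [v], rooms')) (acc, d)).1
    = (rooms.foldl
      (fun (st : List Int × PySem.Set Int) room =>
        let v := scanUp (st.2.length + 1) st.2 room
        (st.1 ++ [v], PySem.Set.add st.2 v)) (acc, s)).1 := by
  induction rooms with
  | nil => intro acc d s _ _; rfl
  | cons r rest ih =>
    intro acc d s hinv hks
    obtain ⟨v, d', heq, hle, hnone, hcov, hkeys, hvals⟩ :=
      findA_spec (d.size + 1) d r hinv (keys_countP_lt_size_succ d r)
    have hsfuel : s.countP (fun x => decide (r ≤ x)) < s.length + 1 := by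
      have : s.countP (fun x => decide (r ≤ x)) ≤ s.length := List.countP_le_length
      omega
    obtain ⟨hw1, hw2, hw3⟩ := scanUp_spec (s.length + 1) s r hsfuel
    have hvw : v = scanUp (s.length + 1) s r := by
      apply first_free_unique (fun z => z ∈ s) r
      · exact hle
      · rw [← hks v, hnone]; simp
      · intro z h1 h2; rw [← hks z]; exact hcov z h1 h2
      · exact hw1
      · exact hw2
      · exact hw3
    simp only [List.foldl_cons, heq]
    rw [← hvw]
    apply ih
    · intro x y hxy
      rcases hvals x y hxy with h | ⟨h1, h2, h3⟩
      · obtain ⟨hlt, hint⟩ := hinv x y h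
        exact ⟨hlt, fun z hz1 hz2 => (hkeys z).mpr (Or.inl (hint z hz1 hz2))⟩
      · subst h1
        refine ⟨by omega, fun z hz1 hz2 => ?_⟩
        by_cases hzv : z = v
        · exact (hkeys z).mpr (Or.inr hzv)
        · exact (hkeys z).mpr (Or.inl (h3 z hz1 (by omega)))
    · intro x
      rw [hkeys x, hks x, PySem.Set.mem_add]

-- ===== VERDICT (by name: the statement is the Claim_ definition above) =====
theorem solution_spec : Claim_equal_solution := by
  intro k room_number _
  unfold Spec_solution solution solution_alt
  apply main_loop
  · intro x y hxy; simp [PySem.Dict.get?_empty] at hxy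
  · intro x; simp [PySem.Dict.get?_empty, PySem.Set.empty]
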